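-- pv_equiv track=rewrite | github.com/Vergil0327/leetcode-history | Bit Manipulation/linear_basis.py | find_max_xor
-- ===== SOURCE A (Python) =====
-- def find_max_xor(nums):
--     basis = []
--     for x in nums:
--         for b in basis:
--             x = min(x, x^b)
--         if x > 0:
--             basis.append(x)
--
--     res = 0
--     basis.sort(reverse=True)
--     for b in basis:
--         res = max(res, res^b)
--     return res
-- ===== SOURCE B (Python) =====
-- def find_max_xor(nums):
--     # Reduced row echelon form over GF(2): each pivot bit occurs in exactly
--     # one row, so the maximum subset XOR is simply the XOR of all rows --
--     # no sort, no min/max comparisons anywhere.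
--     rows = []
--     for x in nums:
--         for r in rows:
--             if x >> r.bit_length() - 1 & 1:
--                 x ^= r
--         if x > 0:
--             rows = [r ^ x if r >> x.bit_length() - 1 & 1 else r for r in rows] + [x]
--     res = 0
--     for r in rows:
--         res ^= r
--     return res
-- ===== Notes on version B (the rewrite author's own statement) =====
-- stated objective: alternative
-- what changed: Replaces A's basis list with min(x,x^b) reduction plus a final sort and greedy max query by Gauss-Jordan elimination to reduced row echelon form (each pivot bit occurs in exactly one row because new vectors are back-eliminated from the existing rows), so the answer is simply the XOR of all rows: no sort, no min/max comparisons anywhere.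
import Mathlib
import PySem

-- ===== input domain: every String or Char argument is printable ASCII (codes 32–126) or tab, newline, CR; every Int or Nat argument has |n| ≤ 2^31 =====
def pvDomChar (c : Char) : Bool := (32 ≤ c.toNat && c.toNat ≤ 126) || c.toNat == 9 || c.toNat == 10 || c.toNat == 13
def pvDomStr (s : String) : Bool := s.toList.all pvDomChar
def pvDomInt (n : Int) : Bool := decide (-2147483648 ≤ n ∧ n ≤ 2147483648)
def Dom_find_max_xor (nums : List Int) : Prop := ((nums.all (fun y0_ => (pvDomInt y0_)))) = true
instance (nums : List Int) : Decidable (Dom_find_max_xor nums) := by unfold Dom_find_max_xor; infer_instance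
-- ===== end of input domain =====

-- B replaces A's linear-basis list (inner min(x,x^b) scan, then sort + greedy max query)
-- by Gauss-Jordan elimination to reduced row echelon form: a new vector is also
-- back-eliminated from the existing rows, so each pivot bit lives in exactly one row and
-- the answer is simply the XOR of all rows — no sort and no min/max comparisons anywhere.
-- ===== PORT A =====
def find_max_xor (nums : List Int) : Int :=
  let basis : List Int := nums.foldl (fun basis x =>
    let x := basis.foldl (fun x b => min x (PySem.Int.bxor x b)) x
    if x > 0 then basis ++ [x] else basis) []
  let basis := PySem.List.sorted basis (fun b => b) true
  basis.foldl (fun res b => max res (PySem.Int.bxor res b)) 0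

-- ===== PORT B =====
-- 'x >> r.bit_length() - 1' : rows only ever hold positive values, so the shift amount
-- is ≥ 0 and Nat subtraction in 'bitLength r - 1' is exact; likewise 'x.bit_length() - 1'
-- is only reached under the guard x > 0.
def find_max_xor_alt (nums : List Int) : Int :=
  let rows : List Int := nums.foldl (fun (rows : List Int) (x : Int) =>
    let x := rows.foldl (fun (x : Int) (r : Int) =>
      if PySem.Int.band (x >>> ((PySem.Int.bitLength r - 1 : Nat))) 1 ≠ 0 then PySem.Int.bxor x r
      else x) x
    if x > 0 then
      (rows.map (fun (r : Int) =>
        if PySem.Int.band (r >>> ((PySem.Int.bitLength x - 1 : Nat))) 1 ≠ 0 then PySem.Int.bxor r x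
        else r)) ++ [x]
    else rows) []
  rows.foldl (fun res r => PySem.Int.bxor res r) 0

-- ===== PRECONDITION & SPEC =====
def Spec_find_max_xor (nums : List Int) (out : Int) : Prop := out = find_max_xor_alt nums
instance (nums : List Int) (out : Int) : Decidable (Spec_find_max_xor nums out) := by unfold Spec_find_max_xor; infer_instance

-- ===== CLAIM (what is proved, stated in full; the proofs are below) =====
def Claim_equal_find_max_xor : Prop := ∀ (nums : List Int), Dom_find_max_xor nums → Spec_find_max_xor nums (find_max_xor nums)

-- ===== LEMMAS AND PROOFS =====

-- A's basis invariant: positive, bounded, later vectors never contain earlier leading bits.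
def pvInv (L : List Nat) : Prop :=
  (∀ b ∈ L, 0 < b ∧ b < 2^32) ∧ L.Pairwise (fun a b => b.testBit a.log2 = false)

-- B's reduced-row-echelon invariant: additionally earlier rows never contain later pivots.
def pvInvB (L : List Nat) : Prop :=
  (∀ b ∈ L, 0 < b ∧ b < 2^32) ∧
  L.Pairwise (fun a b => b.testBit a.log2 = false ∧ a.testBit b.log2 = false)

theorem pvInvB_inv {L : List Nat} (h : pvInvB L) : pvInv L :=
  ⟨h.1, h.2.imp (fun hab => hab.1)⟩

inductive pvSpan : List Nat → Nat → Prop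
  | nil : pvSpan [] 0
  | skip {L : List Nat} {z b : Nat} : pvSpan L z → pvSpan (b :: L) z
  | use {L : List Nat} {z b : Nat} : pvSpan L z → pvSpan (b :: L) (b ^^^ z)

theorem pvSpan_zero (L : List Nat) : pvSpan L 0 := by
  induction L with
  | nil => exact .nil
  | cons b L ih => exact .skip ih

theorem pvSpan_mem {L : List Nat} {b : Nat} (h : b ∈ L) : pvSpan L b := by
  induction L with
  | nil => cases h
  | cons a L ih =>
    rcases List.mem_cons.1 h with h | h
    · subst h; simpa using pvSpan.use (pvSpan_zero L)
    · exact .skip (ih h)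

theorem pvSpan_xor {L : List Nat} {z1 z2 : Nat} (h1 : pvSpan L z1) (h2 : pvSpan L z2) :
    pvSpan L (z1 ^^^ z2) := by
  induction h1 generalizing z2 with
  | nil => cases h2; simpa using pvSpan.nil
  | @skip L z b _ ih =>
    cases h2 with
    | skip h2 => exact .skip (ih h2)
    | use h2 =>
      rw [Nat.xor_left_comm]
      exact .use (ih h2)
  | @use L z b _ ih =>
    cases h2 with
    | skip h2 =>
      rw [Nat.xor_assoc]
      exact .use (ih h2)
    | use h2 =>
      have e : ∀ u v : Nat, (b ^^^ u) ^^^ (b ^^^ v) = u ^^^ v := by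
        intro u v
        simp [Nat.xor_assoc, Nat.xor_left_comm, Nat.xor_comm, Nat.xor_self]
      rw [e]
      exact .skip (ih h2)

theorem pvSpan_subset {L1 L2 : List Nat} (h : ∀ a ∈ L1, pvSpan L2 a) {z : Nat}
    (hz : pvSpan L1 z) : pvSpan L2 z := by
  induction hz with
  | nil => exact pvSpan_zero L2
  | @skip L z b _ ih => exact ih (fun a ha => h a (List.mem_cons_of_mem _ ha))
  | @use L z b _ ih =>
    exact pvSpan_xor (h b List.mem_cons_self) (ih (fun a ha => h a (List.mem_cons_of_mem _ ha)))

theorem pvSpan_of_perm {L1 L2 : List Nat} (h : L1.Perm L2) {z : Nat} (hz : pvSpan L1 z) :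
    pvSpan L2 z :=
  pvSpan_subset (fun a ha => pvSpan_mem (h.mem_iff.1 ha)) hz

theorem pvSpan_cons_iff {L : List Nat} {y z : Nat} :
    pvSpan (y :: L) z ↔ pvSpan L z ∨ pvSpan L (z ^^^ y) := by
  constructor
  · intro h
    cases h with
    | skip h => exact Or.inl h
    | use h =>
      refine Or.inr ?_
      rw [Nat.xor_comm y, Nat.xor_assoc, Nat.xor_self, Nat.xor_zero]
      exact h
  · rintro (h | h)
    · exact .skip h
    · have := pvSpan.use (b := y) h
      rwa [Nat.xor_comm z, ← Nat.xor_assoc, Nat.xor_self, Nat.zero_xor] at this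

theorem pvSpan_snoc_iff {L : List Nat} {y z : Nat} :
    pvSpan (L ++ [y]) z ↔ pvSpan L z ∨ pvSpan L (z ^^^ y) := by
  have hp : (L ++ [y]).Perm (y :: L) := List.perm_append_singleton y L
  rw [show (pvSpan (L ++ [y]) z ↔ pvSpan (y :: L) z) from
    ⟨pvSpan_of_perm hp, pvSpan_of_perm hp.symm⟩]
  exact pvSpan_cons_iff

theorem pvTestBit_log2_self {y : Nat} (h : 0 < y) : Nat.testBit y y.log2 = true := by
  have h1 := Nat.log2_self_le (by omega : y ≠ 0)
  have h2 := Nat.lt_log2_self (n := y)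
  rw [Nat.testBit_eq_decide_div_mod_eq]
  have : y / 2 ^ y.log2 = 1 := Nat.div_eq_of_lt_le (by omega) (by rw [pow_succ] at h2; omega)
  simp [this]

theorem pvTestBit_high {b j : Nat} (hb : 0 < b) (h : b.log2 < j) : b.testBit j = false :=
  Nat.testBit_lt_two_pow (lt_of_lt_of_le Nat.lt_log2_self (Nat.pow_le_pow_right (by norm_num) h))

theorem pvTestBit_le_log2 {d j : Nat} (h : d.testBit j = true) : j ≤ d.log2 := by
  by_contra hlt
  have hd : 0 < d := by
    rcases Nat.eq_zero_or_pos d with rfl | hd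
    · simp at h
    · exact hd
  rw [pvTestBit_high hd (by omega)] at h
  simp at h

theorem pvSpan_testBit_false {L : List Nat} {z p : Nat}
    (hL : ∀ b ∈ L, b.testBit p = false) (h : pvSpan L z) : z.testBit p = false := by
  induction h with
  | nil => simp
  | @skip L z b _ ih => exact ih (fun b hb => hL b (List.mem_cons_of_mem _ hb))
  | @use L z b _ ih =>
    rw [Nat.testBit_xor, hL b (List.mem_cons_self), ih (fun b hb => hL b (List.mem_cons_of_mem _ hb))]
    rfl

theorem pvSpan_lt {L : List Nat} {k : Nat} (hL : ∀ b ∈ L, b < 2^k) {z : Nat}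
    (h : pvSpan L z) : z < 2^k := by
  induction h with
  | nil => exact Nat.two_pow_pos k
  | @skip L z b _ ih => exact ih (fun b hb => hL b (List.mem_cons_of_mem _ hb))
  | @use L z b _ ih =>
    exact Nat.xor_lt_two_pow (hL b List.mem_cons_self)
      (ih (fun b hb => hL b (List.mem_cons_of_mem _ hb)))

theorem pvSpan_cleared_eq_zero {L : List Nat} {z : Nat} (hI : pvInv L) (h : pvSpan L z)
    (hc : ∀ b ∈ L, z.testBit b.log2 = false) : z = 0 := by
  induction h with
  | nil => rfl
  | @skip L z b _ ih =>
    exact ih ⟨fun b hb => hI.1 b (List.mem_cons_of_mem _ hb), (List.pairwise_cons.1 hI.2).2⟩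
      (fun b hb => hc b (List.mem_cons_of_mem _ hb))
  | @use L z b hs ih =>
    exfalso
    have hb0 : 0 < b := (hI.1 b List.mem_cons_self).1
    have hz : z.testBit b.log2 = false :=
      pvSpan_testBit_false (fun b' hb' => (List.pairwise_cons.1 hI.2).1 b' hb') hs
    have := hc b List.mem_cons_self
    rw [Nat.testBit_xor, hz, pvTestBit_log2_self hb0] at this
    simp at this

-- ===== A's reduction, Nat level =====
def pvRedA (x : Nat) (L : List Nat) : Nat := L.foldl (fun x b => min x (x ^^^ b)) x

theorem pvMinXor {b : Nat} (hb : 0 < b) (x : Nat) :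
    min x (x ^^^ b) = if x.testBit b.log2 then x ^^^ b else x := by
  have hbl : b.testBit b.log2 = true := pvTestBit_log2_self hb
  have hhigh : ∀ j, b.log2 < j → (x ^^^ b).testBit j = x.testBit j := by
    intro j hj
    rw [Nat.testBit_xor, pvTestBit_high hb hj]
    simp
  by_cases h : x.testBit b.log2
  · have hlt : x ^^^ b < x := by
      refine Nat.lt_of_testBit b.log2 ?_ h (fun j hj => hhigh j hj)
      rw [Nat.testBit_xor, h, hbl]
      rfl
    simp [h, Nat.min_eq_right (Nat.le_of_lt hlt)]
  · have hlt : x < x ^^^ b := by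
      refine Nat.lt_of_testBit b.log2 (by simpa using h) ?_ (fun j hj => (hhigh j hj).symm)
      rw [Nat.testBit_xor, hbl, Bool.xor_true]
      simpa using h
    simp [h, Nat.min_eq_left (Nat.le_of_lt hlt)]

theorem pvRedA_span (x : Nat) (L : List Nat) : pvSpan L (x ^^^ pvRedA x L) := by
  induction L generalizing x with
  | nil => simpa [pvRedA] using pvSpan_zero []
  | cons b L ih =>
    show pvSpan (b :: L) (x ^^^ pvRedA (min x (x ^^^ b)) L)
    rcases min_choice x (x ^^^ b) with h | h
    · rw [h]; exact .skip (ih x)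
    · rw [h]
      have : x ^^^ pvRedA (x ^^^ b) L = b ^^^ ((x ^^^ b) ^^^ pvRedA (x ^^^ b) L) := by
        simp [← Nat.xor_assoc, Nat.xor_left_comm, Nat.xor_comm]
      rw [this]
      exact .use (ih (x ^^^ b))

theorem pvRedA_bit_false {L : List Nat} {p : Nat} (hL : ∀ b ∈ L, b.testBit p = false)
    {x : Nat} (hx : x.testBit p = false) : (pvRedA x L).testBit p = false := by
  induction L generalizing x with
  | nil => exact hx
  | cons b L ih =>
    show (pvRedA (min x (x ^^^ b)) L).testBit p = false
    refine ih (fun b hb => hL b (List.mem_cons_of_mem _ hb)) ?_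
    rcases min_choice x (x ^^^ b) with h | h <;> rw [h]
    · exact hx
    · rw [Nat.testBit_xor, hx, hL b List.mem_cons_self]
      rfl

theorem pvRedA_cleared {L : List Nat} (hI : pvInv L) (x : Nat) :
    ∀ b ∈ L, (pvRedA x L).testBit b.log2 = false := by
  induction L generalizing x with
  | nil => intro b hb; cases hb
  | cons b0 L ih =>
    intro b hb
    have hI' : pvInv L := ⟨fun c hc => hI.1 c (List.mem_cons_of_mem _ hc), (List.pairwise_cons.1 hI.2).2⟩
    rcases List.mem_cons.1 hb with h | h
    · subst h
      show (pvRedA (min x (x ^^^ b)) L).testBit b.log2 = false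
      refine pvRedA_bit_false (fun c hc => (List.pairwise_cons.1 hI.2).1 c hc) ?_
      rw [pvMinXor (hI.1 b List.mem_cons_self).1]
      by_cases h : x.testBit b.log2
      · simp [h, Nat.testBit_xor, pvTestBit_log2_self (hI.1 b List.mem_cons_self).1]
      · simpa [h] using h
    · exact ih hI' (min x (x ^^^ b0)) b h

theorem pvRedA_lt {L : List Nat} (hL : ∀ b ∈ L, b < 2^32) {x : Nat} (hx : x < 2^32) :
    pvRedA x L < 2^32 := by
  induction L generalizing x with
  | nil => exact hx
  | cons b L ih =>
    show pvRedA (min x (x ^^^ b)) L < 2^32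
    refine ih (fun c hc => hL c (List.mem_cons_of_mem _ hc)) ?_
    rcases min_choice x (x ^^^ b) with h | h <;> rw [h]
    · exact hx
    · exact Nat.xor_lt_two_pow hx (hL b List.mem_cons_self)

-- ===== B's reduction and elimination, Nat level =====
def pvRedB (x : Nat) (L : List Nat) : Nat :=
  L.foldl (fun x r => if x.testBit r.log2 then x ^^^ r else x) x

def pvElim (L : List Nat) (y : Nat) : List Nat :=
  L.map (fun r => if r.testBit y.log2 then r ^^^ y else r)

def pvXorAll (L : List Nat) : Nat := L.foldl (· ^^^ ·) 0

def pvGreedy (L : List Nat) (res : Nat) : Nat :=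
  L.foldl (fun res b => max res (res ^^^ b)) res

theorem pvRedB_span (x : Nat) (L : List Nat) : pvSpan L (x ^^^ pvRedB x L) := by
  induction L generalizing x with
  | nil => simpa [pvRedB] using pvSpan_zero []
  | cons r L ih =>
    show pvSpan (r :: L) (x ^^^ pvRedB (if x.testBit r.log2 then x ^^^ r else x) L)
    by_cases h : x.testBit r.log2
    · rw [if_pos h]
      have : x ^^^ pvRedB (x ^^^ r) L = r ^^^ ((x ^^^ r) ^^^ pvRedB (x ^^^ r) L) := by
        simp [← Nat.xor_assoc, Nat.xor_left_comm, Nat.xor_comm]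
      rw [this]
      exact .use (ih (x ^^^ r))
    · rw [if_neg h]
      exact .skip (ih x)

theorem pvRedB_bit_false {L : List Nat} {p : Nat} (hL : ∀ r ∈ L, r.testBit p = false)
    {x : Nat} (hx : x.testBit p = false) : (pvRedB x L).testBit p = false := by
  induction L generalizing x with
  | nil => exact hx
  | cons r L ih =>
    show (pvRedB (if x.testBit r.log2 then x ^^^ r else x) L).testBit p = false
    refine ih (fun r hr => hL r (List.mem_cons_of_mem _ hr)) ?_
    split_ifs
    · rw [Nat.testBit_xor, hx, hL r List.mem_cons_self]
      rfl
    · exact hx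

theorem pvRedB_cleared {L : List Nat} (hI : pvInvB L) (x : Nat) :
    ∀ r ∈ L, (pvRedB x L).testBit r.log2 = false := by
  induction L generalizing x with
  | nil => intro r hr; cases hr
  | cons r0 L ih =>
    intro r hr
    have hI' : pvInvB L := ⟨fun c hc => hI.1 c (List.mem_cons_of_mem _ hc), (List.pairwise_cons.1 hI.2).2⟩
    rcases List.mem_cons.1 hr with h | h
    · subst h
      show (pvRedB (if x.testBit r.log2 then x ^^^ r else x) L).testBit r.log2 = false
      refine pvRedB_bit_false (fun c hc => ((List.pairwise_cons.1 hI.2).1 c hc).1) ?_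
      split_ifs with h
      · rw [Nat.testBit_xor, h, pvTestBit_log2_self (hI.1 r List.mem_cons_self).1]
        rfl
      · simpa using h
    · exact ih hI' _ r h

theorem pvRedB_lt {L : List Nat} (hL : ∀ r ∈ L, r < 2^32) {x : Nat} (hx : x < 2^32) :
    pvRedB x L < 2^32 := by
  induction L generalizing x with
  | nil => exact hx
  | cons r L ih =>
    show pvRedB (if x.testBit r.log2 then x ^^^ r else x) L < 2^32
    refine ih (fun c hc => hL c (List.mem_cons_of_mem _ hc)) ?_
    split_ifs
    · exact Nat.xor_lt_two_pow hx (hL r List.mem_cons_self)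
    · exact hx

-- the reduced value is 0 iff x was already in the span
theorem pvRed_zero_iff {L : List Nat} (hI : pvInv L) {x y : Nat}
    (hsp : pvSpan L (x ^^^ y)) (hc : ∀ b ∈ L, y.testBit b.log2 = false) :
    (y = 0 ↔ pvSpan L x) := by
  constructor
  · intro h; subst h; simpa using hsp
  · intro hx
    have : pvSpan L y := by
      have := pvSpan_xor hx hsp
      rwa [← Nat.xor_assoc, Nat.xor_self, Nat.zero_xor] at this
    exact pvSpan_cleared_eq_zero hI this hc

-- ===== invariant preservation =====
theorem pvInv_append {L : List Nat} (hI : pvInv L) {y : Nat} (hy : 0 < y) (hylt : y < 2^32)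
    (hc : ∀ b ∈ L, y.testBit b.log2 = false) : pvInv (L ++ [y]) := by
  constructor
  · intro b hb
    rcases List.mem_append.1 hb with hb | hb
    · exact hI.1 b hb
    · rcases List.mem_singleton.1 hb with rfl
      exact ⟨hy, hylt⟩
  · rw [List.pairwise_append]
    refine ⟨hI.2, List.pairwise_singleton _ _, ?_⟩
    intro a ha b hb
    rcases List.mem_singleton.1 hb with rfl
    exact hc a ha

theorem pvElim_log2 {L : List Nat} (hI : pvInvB L) {y : Nat} (hy : 0 < y) 
    (hc : ∀ r ∈ L, y.testBit r.log2 = false) {r : Nat} (hr : r ∈ L) :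
    (if r.testBit y.log2 then r ^^^ y else r).log2 = r.log2 ∧
    0 < (if r.testBit y.log2 then r ^^^ y else r) := by
  have hr0 : 0 < r := (hI.1 r hr).1
  by_cases h : r.testBit y.log2
  · rw [if_pos h]
    have hle : y.log2 ≤ r.log2 := pvTestBit_le_log2 h
    have hne : y.log2 ≠ r.log2 := by
      intro he
      have := hc r hr
      rw [← he, pvTestBit_log2_self hy] at this
      simp at this
    have hbit : (r ^^^ y).testBit r.log2 = true := by
      rw [Nat.testBit_xor, pvTestBit_log2_self hr0, hc r hr]
      rfl
    have hpos : 0 < r ^^^ y := by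
      rcases Nat.eq_zero_or_pos (r ^^^ y) with h0 | h0
      · rw [h0] at hbit; simp at hbit
      · exact h0
    have hge : r.log2 ≤ (r ^^^ y).log2 := pvTestBit_le_log2 hbit
    have hlt : r ^^^ y < 2^(r.log2 + 1) :=
      Nat.xor_lt_two_pow Nat.lt_log2_self
        (lt_of_lt_of_le Nat.lt_log2_self (Nat.pow_le_pow_right (by norm_num) (by omega)))
    have := (Nat.log2_lt (by omega : r ^^^ y ≠ 0)).2 hlt
    exact ⟨by omega, hpos⟩
  · rw [if_neg h]
    exact ⟨rfl, hr0⟩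

theorem pvInvB_step {L : List Nat} (hI : pvInvB L) {y : Nat} (hy : 0 < y) (hylt : y < 2^32)
    (hc : ∀ r ∈ L, y.testBit r.log2 = false) : pvInvB (pvElim L y ++ [y]) := by
  have hfb : ∀ r ∈ L, ∀ p, y.testBit p = false → r.testBit p = false →
      (if r.testBit y.log2 then r ^^^ y else r).testBit p = false := by
    intro r hr p hyp hrp
    split_ifs
    · rw [Nat.testBit_xor, hrp, hyp]; rfl
    · exact hrp
  have hfly : ∀ r ∈ L, (if r.testBit y.log2 then r ^^^ y else r).testBit y.log2 = false := by
    intro r hr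
    by_cases h : r.testBit y.log2
    · rw [if_pos h, Nat.testBit_xor, h, pvTestBit_log2_self hy]; rfl
    · rw [if_neg h]; simpa using h
  constructor
  · intro b hb
    rcases List.mem_append.1 hb with hb | hb
    · rcases List.mem_map.1 hb with ⟨r, hr, rfl⟩
      refine ⟨(pvElim_log2 hI hy hc hr).2, ?_⟩
      split_ifs
      · exact Nat.xor_lt_two_pow (hI.1 r hr).2 hylt
      · exact (hI.1 r hr).2
    · rcases List.mem_singleton.1 hb with rfl
      exact ⟨hy, hylt⟩
  · rw [List.pairwise_append]
    refine ⟨?_, List.pairwise_singleton _ _, ?_⟩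
    · rw [pvElim, List.pairwise_map]
      refine hI.2.imp_of_mem ?_
      intro a b ha hb hab
      constructor
      · rw [(pvElim_log2 hI hy hc ha).1]
        exact hfb b hb _ (hc a ha) hab.1
      · rw [(pvElim_log2 hI hy hc hb).1]
        exact hfb a ha _ (hc b hb) hab.2
    · intro a ha b hb
      rcases List.mem_singleton.1 hb with rfl
      rcases List.mem_map.1 ha with ⟨r, hr, rfl⟩
      constructor
      · rw [(pvElim_log2 hI hy hc hr).1]
        exact hc r hr
      · exact hfly r hr

theorem pvElim_span_iff {L : List Nat} {y z : Nat} :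
    pvSpan (pvElim L y ++ [y]) z ↔ pvSpan (L ++ [y]) z := by
  constructor
  · refine pvSpan_subset ?_
    intro a ha
    rcases List.mem_append.1 ha with ha | ha
    · rcases List.mem_map.1 ha with ⟨r, hr, rfl⟩
      by_cases h : r.testBit y.log2
      · rw [if_pos h]
        exact pvSpan_xor (pvSpan_mem (List.mem_append_left _ hr))
          (pvSpan_mem (List.mem_append_right _ (List.mem_singleton.2 rfl)))
      · rw [if_neg h]
        exact pvSpan_mem (List.mem_append_left _ hr)
    · rcases List.mem_singleton.1 ha with rfl
      exact pvSpan_mem (List.mem_append_right _ (List.mem_singleton.2 rfl))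
  · refine pvSpan_subset ?_
    intro a ha
    have hymem : pvSpan (pvElim L y ++ [y]) y :=
      pvSpan_mem (List.mem_append_right _ (List.mem_singleton.2 rfl))
    rcases List.mem_append.1 ha with ha | ha
    · have hfm : (if a.testBit y.log2 then a ^^^ y else a) ∈ pvElim L y ++ [y] :=
        List.mem_append_left _ (List.mem_map.2 ⟨a, ha, rfl⟩)
      by_cases h : a.testBit y.log2
      · rw [if_pos h] at hfm
        have := pvSpan_xor (pvSpan_mem hfm) hymem
        rwa [Nat.xor_assoc, Nat.xor_self, Nat.xor_zero] at this
      · rw [if_neg h] at hfm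
        exact pvSpan_mem hfm
    · rcases List.mem_singleton.1 ha with rfl
      exact hymem

-- ===== the maximum-of-span characterisations =====
-- for any w below the highest bit where u and v differ, xoring w does not change which is larger
theorem pvMaxXor2_lt {u v : Nat} (hlt : u < v) {w : Nat} (hw : w < 2^((u ^^^ v).log2)) :
    u ^^^ w < v ^^^ w := by
  have hd0 : u ^^^ v ≠ 0 := fun h => (by omega : u ≠ v) (Nat.xor_eq_zero_iff.1 h)
  set l := (u ^^^ v).log2 with hl
  have hdl : (u ^^^ v).testBit l = true := pvTestBit_log2_self (Nat.pos_of_ne_zero hd0)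
  have hagree : ∀ j, l < j → u.testBit j = v.testBit j := by
    intro j hj
    have := pvTestBit_high (Nat.pos_of_ne_zero hd0) hj
    rw [Nat.testBit_xor] at this
    cases h1 : u.testBit j <;> cases h2 : v.testBit j <;> simp [h1, h2] at this ⊢
  have hwb : ∀ j, l ≤ j → w.testBit j = false := by
    intro j hj
    exact Nat.testBit_lt_two_pow (lt_of_lt_of_le hw (Nat.pow_le_pow_right (by norm_num) hj))
  have hvl : v.testBit l = true := by
    by_contra hv
    have hu : u.testBit l = true := by
      have := hdl
      rw [Nat.testBit_xor] at this
      cases hu : u.testBit l <;> simp [hu, eq_false_of_ne_true hv] at this ⊢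
    have : v < u := by
      refine Nat.lt_of_testBit l ?_ hu (fun j hj => (hagree j hj).symm)
      exact eq_false_of_ne_true hv
    omega
  have hul : u.testBit l = false := by
    have := hdl
    rw [Nat.testBit_xor, hvl] at this
    cases hu : u.testBit l <;> simp [hu] at this ⊢
  refine Nat.lt_of_testBit l ?_ ?_ ?_
  · rw [Nat.testBit_xor, hul, hwb l le_rfl]
    rfl
  · rw [Nat.testBit_xor, hvl, hwb l le_rfl]
    rfl
  · intro j hj
    rw [Nat.testBit_xor, Nat.testBit_xor, hagree j hj]

theorem pvMaxXor2 {u v : Nat} (hne : u ≠ v) {w : Nat} (hw : w < 2^((u ^^^ v).log2)) :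
    max (u ^^^ w) (v ^^^ w) = (max u v) ^^^ w := by
  rcases Nat.lt_or_ge u v with h | h
  · rw [Nat.max_eq_right (le_of_lt h), Nat.max_eq_right (le_of_lt (pvMaxXor2_lt h hw))]
  · have h' : v < u := lt_of_le_of_ne h (Ne.symm hne)
    have hw' : w < 2^((v ^^^ u).log2) := by rwa [Nat.xor_comm v u]
    rw [Nat.max_eq_left h, Nat.max_eq_left (le_of_lt (pvMaxXor2_lt h' hw'))]

theorem pvGreedy_span (L : List Nat) : ∀ res, pvSpan L (pvGreedy L res ^^^ res) := by
  induction L with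
  | nil =>
    intro res
    show pvSpan [] (res ^^^ res)
    rw [Nat.xor_self]
    exact .nil
  | cons b L ih =>
    intro res
    show pvSpan (b :: L) (pvGreedy L (max res (res ^^^ b)) ^^^ res)
    rcases max_choice res (res ^^^ b) with h | h <;> rw [h]
    · exact .skip (ih res)
    · have e : pvGreedy L (res ^^^ b) ^^^ res =
          b ^^^ (pvGreedy L (res ^^^ b) ^^^ (res ^^^ b)) := by
        simp [Nat.xor_assoc, Nat.xor_left_comm, Nat.xor_comm]
      rw [e]
      exact .use (ih (res ^^^ b))

theorem pvGreedy_ge {L : List Nat} (hpos : ∀ b ∈ L, 0 < b)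
    (hdesc : L.Pairwise (fun a b => b.log2 < a.log2)) :
    ∀ res z, pvSpan L z → res ^^^ z ≤ pvGreedy L res := by
  induction L with
  | nil =>
    intro res z hz
    cases hz
    simp [pvGreedy]
  | cons b L ih =>
    intro res z hz
    have hb0 : 0 < b := hpos b List.mem_cons_self
    have htpos : ∀ c ∈ L, 0 < c := fun c hc => hpos c (List.mem_cons_of_mem _ hc)
    have htdesc := (List.pairwise_cons.1 hdesc).2
    have hhead := (List.pairwise_cons.1 hdesc).1
    have hbound : ∀ c ∈ L, c < 2^(b.log2) := by
      intro c hc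
      calc c < 2^(c.log2 + 1) := Nat.lt_log2_self
        _ ≤ 2^(b.log2) := Nat.pow_le_pow_right (by norm_num) (by have := hhead c hc; omega)
    have hbne : res ≠ res ^^^ b := by
      intro heq
      have : res ^^^ res = res ^^^ (res ^^^ b) := by rw [← heq]
      rw [Nat.xor_self, ← Nat.xor_assoc, Nat.xor_self, Nat.zero_xor] at this
      omega
    have hU : res ^^^ (res ^^^ b) = b := by
      rw [← Nat.xor_assoc, Nat.xor_self, Nat.zero_xor]
    have hkey : ∀ w, w < 2^(b.log2) →
        max (res ^^^ w) ((res ^^^ b) ^^^ w) = (max res (res ^^^ b)) ^^^ w := by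
      intro w hwlt
      exact pvMaxXor2 hbne (by rwa [hU])
    show res ^^^ z ≤ pvGreedy L (max res (res ^^^ b))
    cases hz with
    | skip h =>
      have hwlt : z < 2^(b.log2) := pvSpan_lt hbound h
      calc res ^^^ z ≤ max (res ^^^ z) ((res ^^^ b) ^^^ z) := le_max_left _ _
        _ = (max res (res ^^^ b)) ^^^ z := hkey z hwlt
        _ ≤ pvGreedy L (max res (res ^^^ b)) := ih htpos htdesc _ z h
    | use h =>
      rename_i w
      have hwlt : w < 2^(b.log2) := pvSpan_lt hbound h
      calc res ^^^ (b ^^^ w) = (res ^^^ b) ^^^ w := by rw [Nat.xor_assoc]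
        _ ≤ max (res ^^^ w) ((res ^^^ b) ^^^ w) := le_max_right _ _
        _ = (max res (res ^^^ b)) ^^^ w := hkey w hwlt
        _ ≤ pvGreedy L (max res (res ^^^ b)) := ih htpos htdesc _ w h

theorem pvFoldXor_acc (L : List Nat) : ∀ m, L.foldl (· ^^^ ·) m = m ^^^ L.foldl (· ^^^ ·) 0 := by
  induction L with
  | nil => intro m; simp
  | cons a L ih =>
    intro m
    simp only [List.foldl_cons]
    rw [ih (m ^^^ a), ih (0 ^^^ a), Nat.zero_xor, Nat.xor_assoc]

theorem pvXorAll_cons (b : Nat) (L : List Nat) : pvXorAll (b :: L) = b ^^^ pvXorAll L := by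
  show L.foldl (· ^^^ ·) (0 ^^^ b) = b ^^^ pvXorAll L
  rw [Nat.zero_xor, pvFoldXor_acc L b]
  rfl

theorem pvXorAll_span (L : List Nat) : pvSpan L (pvXorAll L) := by
  induction L with
  | nil => simpa [pvXorAll] using pvSpan.nil
  | cons b L ih =>
    rw [pvXorAll_cons]
    exact .use ih

theorem pvSpan_top_log2 {L : List Nat} (hI : pvInvB L) {d : Nat} (hd : pvSpan L d)
    (hne : d ≠ 0) : ∃ r ∈ L, d.log2 = r.log2 := by
  induction hd with
  | nil => exact absurd rfl hne
  | @skip L z b hs ih =>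
    have hI' : pvInvB L :=
      ⟨fun c hc => hI.1 c (List.mem_cons_of_mem _ hc), (List.pairwise_cons.1 hI.2).2⟩
    rcases ih hI' hne with ⟨r, hr, hlr⟩
    exact ⟨r, List.mem_cons_of_mem _ hr, hlr⟩
  | @use L w b hs ih =>
    have hI' : pvInvB L :=
      ⟨fun c hc => hI.1 c (List.mem_cons_of_mem _ hc), (List.pairwise_cons.1 hI.2).2⟩
    have hb0 : 0 < b := (hI.1 b List.mem_cons_self).1
    have hwlb : w.testBit b.log2 = false := by
      refine pvSpan_testBit_false ?_ hs
      intro c hc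
      exact ((List.pairwise_cons.1 hI.2).1 c hc).1
    rcases Nat.eq_zero_or_pos w with rfl | hw0
    · refine ⟨b, List.mem_cons_self, ?_⟩
      rw [Nat.xor_zero]
    · rcases ih hI' (by omega) with ⟨r, hr, hlr⟩
      have hlne : w.log2 ≠ b.log2 := by
        intro he
        rw [← he, pvTestBit_log2_self hw0] at hwlb
        simp at hwlb
      rcases Nat.lt_or_ge w.log2 b.log2 with hlt | hge
      · -- top bit is b's lead
        refine ⟨b, List.mem_cons_self, ?_⟩
        have hbit : (b ^^^ w).testBit b.log2 = true := by
          rw [Nat.testBit_xor, pvTestBit_log2_self hb0, hwlb]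
          rfl
        have hge2 : b.log2 ≤ (b ^^^ w).log2 := pvTestBit_le_log2 hbit
        have hlt2 : b ^^^ w < 2^(b.log2 + 1) :=
          Nat.xor_lt_two_pow Nat.lt_log2_self
            (lt_of_lt_of_le Nat.lt_log2_self (Nat.pow_le_pow_right (by norm_num) (by omega)))
        have := (Nat.log2_lt (by omega : b ^^^ w ≠ 0)).2 hlt2
        omega
      · -- top bit is w's lead
        have hlt : b.log2 < w.log2 := by omega
        refine ⟨r, List.mem_cons_of_mem _ hr, ?_⟩
        have hbit : (b ^^^ w).testBit w.log2 = true := by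
          rw [Nat.testBit_xor, pvTestBit_high hb0 hlt, pvTestBit_log2_self hw0]
          rfl
        have hge2 : w.log2 ≤ (b ^^^ w).log2 := pvTestBit_le_log2 hbit
        have hlt2 : b ^^^ w < 2^(w.log2 + 1) :=
          Nat.xor_lt_two_pow
            (lt_of_lt_of_le Nat.lt_log2_self (Nat.pow_le_pow_right (by norm_num) (by omega)))
            Nat.lt_log2_self
        have := (Nat.log2_lt (by omega : b ^^^ w ≠ 0)).2 hlt2
        omega

theorem pvXorAll_bit_pivot {L : List Nat} (hI : pvInvB L) {r : Nat} (hr : r ∈ L) :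
    (pvXorAll L).testBit r.log2 = true := by
  induction L with
  | nil => cases hr
  | cons b L ih =>
    have hI' : pvInvB L :=
      ⟨fun c hc => hI.1 c (List.mem_cons_of_mem _ hc), (List.pairwise_cons.1 hI.2).2⟩
    rw [pvXorAll_cons, Nat.testBit_xor]
    rcases List.mem_cons.1 hr with rfl | hr
    · have htail : (pvXorAll L).testBit r.log2 = false := by
        refine pvSpan_testBit_false ?_ (pvXorAll_span L)
        intro c hc
        exact ((List.pairwise_cons.1 hI.2).1 c hc).1
      rw [pvTestBit_log2_self (hI.1 r List.mem_cons_self).1, htail]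
      rfl
    · rw [ih hI' hr, ((List.pairwise_cons.1 hI.2).1 r hr).2]
      rfl

theorem pvXorAll_max {L : List Nat} (hI : pvInvB L) {z : Nat} (hz : pvSpan L z) :
    z ≤ pvXorAll L := by
  set S := pvXorAll L with hS
  rcases eq_or_ne z S with rfl | hne
  · exact le_refl _
  have hd : pvSpan L (z ^^^ S) := pvSpan_xor hz (pvXorAll_span L)
  have hdne : z ^^^ S ≠ 0 := fun h => hne (Nat.xor_eq_zero_iff.1 h)
  rcases pvSpan_top_log2 hI hd hdne with ⟨r, hr, hlr⟩
  have hSl : S.testBit r.log2 = true := pvXorAll_bit_pivot hI hr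
  have hdl : (z ^^^ S).testBit (z ^^^ S).log2 = true :=
    pvTestBit_log2_self (Nat.pos_of_ne_zero hdne)
  have hzl : z.testBit r.log2 = false := by
    have := hdl
    rw [hlr, Nat.testBit_xor, hSl] at this
    cases hz' : z.testBit r.log2 <;> simp [hz'] at this ⊢
  refine le_of_lt (Nat.lt_of_testBit r.log2 hzl hSl ?_)
  intro j hj
  have : (z ^^^ S).testBit j = false := by
    refine pvTestBit_high (Nat.pos_of_ne_zero hdne) ?_
    omega
  rw [Nat.testBit_xor] at this
  cases h1 : z.testBit j <;> cases h2 : S.testBit j <;> simp [h1, h2] at this ⊢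

-- ===== Int ↔ Nat bridges =====
theorem pvBandBit (m n : Nat) :
    (PySem.Int.band ((m : Int) >>> n) 1 ≠ 0) ↔ m.testBit n = true := by
  rw [show ((m : Int) >>> n) = ((m >>> n : Nat) : Int) by exact_mod_cast Int.natCast_shiftRight m n,
    show (1 : Int) = ((1 : Nat) : Int) from rfl, PySem.Int.band_natCast,
    Nat.and_one_is_mod, Nat.shiftRight_eq_div_pow, Nat.testBit_eq_decide_div_mod_eq]
  constructor
  · intro h
    simp only [ne_eq, Nat.cast_eq_zero] at h
    simpa using Nat.mod_two_eq_zero_or_one (m / 2 ^ n) |>.resolve_left h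
  · intro h
    have := of_decide_eq_true h
    simp [this]

theorem pvBxor_neg {x v : Int} (hx : x < 0) (hv : 0 ≤ v) : PySem.Int.bxor x v < 0 := by
  rw [PySem.Int.bxor, if_neg (by omega), if_pos hv]
  have : (0:Int) ≤ ((-x - 1).toNat ^^^ v.toNat : Nat) := Int.natCast_nonneg _
  omega

theorem pvBitLength_pos {y : Nat} (h : 0 < y) :
    PySem.Int.bitLength ((y : Nat) : Int) = y.log2 + 1 := by
  have hne : ((y : Nat) : Int) ≠ 0 := by exact_mod_cast Nat.pos_iff_ne_zero.1 h
  have h1 := PySem.Int.two_pow_bitLength_le ((y : Nat) : Int) hne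
  have h2 := PySem.Int.lt_two_pow_bitLength ((y : Nat) : Int)
  rw [Int.natAbs_natCast] at h1 h2
  have h3 := Nat.log2_self_le (Nat.pos_iff_ne_zero.1 h)
  have h4 := Nat.lt_log2_self (n := y)
  set bl := PySem.Int.bitLength ((y : Nat) : Int)
  have hbl1 : 1 ≤ bl := by
    by_contra hb
    interval_cases bl
    · simp at h2; omega
  have hlt1 : y.log2 < bl := by
    by_contra hb
    have : 2 ^ bl ≤ 2 ^ y.log2 := Nat.pow_le_pow_right (by norm_num) (by omega)
    omega
  have hlt2 : bl - 1 < y.log2 + 1 := by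
    by_contra hb
    have : 2 ^ (y.log2 + 1) ≤ 2 ^ (bl - 1) := Nat.pow_le_pow_right (by norm_num) (by omega)
    omega
  omega

theorem pvFoldA_natCast (L : List Nat) (m : Nat) :
    (L.map (fun b : Nat => (b : Int))).foldl (fun x b => min x (PySem.Int.bxor x b)) (m : Int) =
      ((pvRedA m L : Nat) : Int) := by
  induction L generalizing m with
  | nil => rfl
  | cons b L ih =>
    rw [List.map_cons, List.foldl_cons, PySem.Int.bxor_natCast, ← Nat.cast_min, ih]
    rfl

theorem pvFoldA_le (LA : List Int) : ∀ x : Int,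
    LA.foldl (fun x b => min x (PySem.Int.bxor x b)) x ≤ x := by
  induction LA with
  | nil => intro x; exact le_refl x
  | cons b LA ih =>
    intro x
    exact le_trans (ih _) (min_le_left _ _)

theorem pvFoldBred_natCast (L : List Nat) (hpos : ∀ r ∈ L, 0 < r) (m : Nat) :
    (L.map (fun b : Nat => (b : Int))).foldl (fun (x : Int) (r : Int) =>
        if PySem.Int.band (x >>> ((PySem.Int.bitLength r - 1 : Nat))) 1 ≠ 0 then PySem.Int.bxor x r
        else x) (m : Int) =
      ((pvRedB m L : Nat) : Int) := by
  induction L generalizing m with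
  | nil => rfl
  | cons r L ih =>
    have hr : 0 < r := hpos r List.mem_cons_self
    have htail : ∀ c ∈ L, 0 < c := fun c hc => hpos c (List.mem_cons_of_mem _ hc)
    rw [List.map_cons, List.foldl_cons]
    have hsh : PySem.Int.bitLength ((r : Nat) : Int) - 1 = r.log2 := by
      rw [pvBitLength_pos hr]; omega
    rw [hsh]
    by_cases h : m.testBit r.log2
    · rw [if_pos ((pvBandBit m r.log2).2 h), PySem.Int.bxor_natCast, ih htail,
        show pvRedB m (r :: L) = pvRedB (m ^^^ r) L by simp [pvRedB, h]]
    · rw [if_neg (by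
        intro hc
        rw [(pvBandBit m r.log2).1 hc] at h
        exact h rfl), ih htail,
        show pvRedB m (r :: L) = pvRedB m L by simp [pvRedB, h]]

theorem pvFoldBred_neg (L : List Nat) : ∀ x : Int, x < 0 →
    (L.map (fun b : Nat => (b : Int))).foldl (fun (x : Int) (r : Int) =>
        if PySem.Int.band (x >>> ((PySem.Int.bitLength r - 1 : Nat))) 1 ≠ 0 then PySem.Int.bxor x r
        else x) x < 0 := by
  induction L with
  | nil => intro x hx; exact hx
  | cons r L ih =>
    intro x hx
    rw [List.map_cons, List.foldl_cons]
    refine ih _ ?_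
    split_ifs
    · exact pvBxor_neg hx (Int.natCast_nonneg r)
    · exact hx

theorem pvElim_natCast (L : List Nat) {y : Nat} (hy : 0 < y) :
    (L.map (fun b : Nat => (b : Int))).map (fun (r : Int) =>
        if PySem.Int.band (r >>> ((PySem.Int.bitLength ((y : Nat) : Int) - 1 : Nat))) 1 ≠ 0
        then PySem.Int.bxor r ((y : Nat) : Int) else r) ++ [((y : Nat) : Int)] =
      (pvElim L y ++ [y]).map (fun b : Nat => (b : Int)) := by
  rw [pvElim, List.map_append, List.map_map, List.map_map]
  congr 1
  refine List.map_congr_left ?_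
  intro r hr
  show (if PySem.Int.band (((r:Nat):Int) >>> ((PySem.Int.bitLength ((y : Nat) : Int) - 1 : Nat))) 1 ≠ 0
      then PySem.Int.bxor ((r:Nat):Int) ((y:Nat):Int) else ((r:Nat):Int)) =
    (((if r.testBit y.log2 then r ^^^ y else r : Nat)) : Int)
  rw [show PySem.Int.bitLength ((y : Nat) : Int) - 1 = y.log2 by rw [pvBitLength_pos hy]; omega]
  by_cases h : r.testBit y.log2
  · rw [if_pos ((pvBandBit r y.log2).2 h), if_pos h, PySem.Int.bxor_natCast]
  · rw [if_neg (by
      intro hc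
      rw [(pvBandBit r y.log2).1 hc] at h
      exact h rfl), if_neg h]

theorem pvFoldQA_natCast (L : List Nat) (m : Nat) :
    (L.map (fun b : Nat => (b : Int))).foldl (fun res b => max res (PySem.Int.bxor res b)) (m : Int) =
      ((pvGreedy L m : Nat) : Int) := by
  induction L generalizing m with
  | nil => rfl
  | cons b L ih =>
    rw [List.map_cons, List.foldl_cons, PySem.Int.bxor_natCast, ← Nat.cast_max, ih]
    rfl

theorem pvFoldQB_aux (L : List Nat) (m : Nat) :
    (L.map (fun b : Nat => (b : Int))).foldl (fun res r => PySem.Int.bxor res r) ((m : Nat) : Int) =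
      ((L.foldl (· ^^^ ·) m : Nat) : Int) := by
  induction L generalizing m with
  | nil => rfl
  | cons b L ih =>
    rw [List.map_cons, List.foldl_cons, PySem.Int.bxor_natCast, ih]
    rfl

theorem pvFoldQB_natCast (L : List Nat) :
    (L.map (fun b : Nat => (b : Int))).foldl (fun res r => PySem.Int.bxor res r) (0 : Int) =
      ((pvXorAll L : Nat) : Int) := by
  exact pvFoldQB_aux L 0

-- ===== the two outer folds, joint state invariant =====
def pvFA (basis : List Int) (x : Int) : List Int :=
  let x := basis.foldl (fun x b => min x (PySem.Int.bxor x b)) x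
  if x > 0 then basis ++ [x] else basis

def pvFB (rows : List Int) (x : Int) : List Int :=
  let x := rows.foldl (fun (x : Int) (r : Int) =>
    if PySem.Int.band (x >>> ((PySem.Int.bitLength r - 1 : Nat))) 1 ≠ 0 then PySem.Int.bxor x r
    else x) x
  if x > 0 then
    (rows.map (fun (r : Int) =>
      if PySem.Int.band (r >>> ((PySem.Int.bitLength x - 1 : Nat))) 1 ≠ 0 then PySem.Int.bxor r x
      else r)) ++ [x]
  else rows

theorem pvStep_state {LA LB : List Nat} (hIA : pvInv LA) (hIB : pvInvB LB)
    (hsp : ∀ z, pvSpan LA z ↔ pvSpan LB z) (x : Int) (hx : x ≤ 2^31) :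
    ∃ LA' LB', pvInv LA' ∧ pvInvB LB' ∧ (∀ z, pvSpan LA' z ↔ pvSpan LB' z) ∧
      pvFA (LA.map (fun b : Nat => (b : Int))) x = LA'.map (fun b : Nat => (b : Int)) ∧
      pvFB (LB.map (fun b : Nat => (b : Int))) x = LB'.map (fun b : Nat => (b : Int)) := by
  by_cases h0 : 0 ≤ x
  · have hxe : x = ((x.toNat : Nat) : Int) := (Int.toNat_of_nonneg h0).symm
    set m := x.toNat with hm
    have hmlt : m < 2^32 := by omega
    have hAfold : (LA.map (fun b : Nat => (b : Int))).foldl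
        (fun x b => min x (PySem.Int.bxor x b)) x = ((pvRedA m LA : Nat) : Int) := by
      rw [hxe]; exact pvFoldA_natCast LA m
    have hBfold : (LB.map (fun b : Nat => (b : Int))).foldl (fun (x : Int) (r : Int) =>
        if PySem.Int.band (x >>> ((PySem.Int.bitLength r - 1 : Nat))) 1 ≠ 0
        then PySem.Int.bxor x r else x) x = ((pvRedB m LB : Nat) : Int) := by
      rw [hxe]; exact pvFoldBred_natCast LB (fun r hr => (hIB.1 r hr).1) m
    set yA := pvRedA m LA with hyA
    set yB := pvRedB m LB with hyB
    have hclA : ∀ b ∈ LA, yA.testBit b.log2 = false := pvRedA_cleared hIA m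
    have hclB : ∀ r ∈ LB, yB.testBit r.log2 = false := pvRedB_cleared hIB m
    have hspA : pvSpan LA (m ^^^ yA) := pvRedA_span m LA
    have hspB : pvSpan LB (m ^^^ yB) := pvRedB_span m LB
    have hzi : yA = 0 ↔ yB = 0 := by
      rw [pvRed_zero_iff hIA hspA hclA, pvRed_zero_iff (pvInvB_inv hIB) hspB hclB, hsp m]
    have hyAlt : yA < 2^32 := pvRedA_lt (fun b hb => (hIA.1 b hb).2) hmlt
    have hyBlt : yB < 2^32 := pvRedB_lt (fun r hr => (hIB.1 r hr).2) hmlt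
    by_cases hpos : 0 < yA
    · have hposB : 0 < yB := by
        rcases Nat.eq_zero_or_pos yB with h | h
        · exact absurd (hzi.2 h) (by omega)
        · exact h
      have hAyB : pvSpan LB (yA ^^^ yB) := by
        have := pvSpan_xor ((hsp _).1 hspA) hspB
        rwa [show (m ^^^ yA) ^^^ (m ^^^ yB) = yA ^^^ yB by
          simp [Nat.xor_assoc, Nat.xor_left_comm, Nat.xor_comm]] at this
      refine ⟨LA ++ [yA], pvElim LB yB ++ [yB], pvInv_append hIA hpos hyAlt hclA,
        pvInvB_step hIB hposB hyBlt hclB, ?_, ?_, ?_⟩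
      · intro z
        rw [pvSpan_snoc_iff, pvElim_span_iff, pvSpan_snoc_iff]
        constructor
        · rintro (h | h)
          · exact Or.inl ((hsp z).1 h)
          · refine Or.inr ?_
            have := pvSpan_xor ((hsp _).1 h) hAyB
            rwa [show (z ^^^ yA) ^^^ (yA ^^^ yB) = z ^^^ yB by
              simp [Nat.xor_assoc, Nat.xor_left_comm, Nat.xor_comm]] at this
        · rintro (h | h)
          · exact Or.inl ((hsp z).2 h)
          · refine Or.inr ?_
            apply (hsp _).2
            have := pvSpan_xor h hAyB
            rwa [show (z ^^^ yB) ^^^ (yA ^^^ yB) = z ^^^ yA by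
              simp [Nat.xor_assoc, Nat.xor_left_comm, Nat.xor_comm]] at this
      · rw [pvFA]
        simp only [hAfold]
        rw [if_pos (by exact_mod_cast hpos), List.map_append]
        rfl
      · rw [pvFB]
        simp only [hBfold]
        rw [if_pos (by exact_mod_cast hposB)]
        exact pvElim_natCast LB hposB
    · have hzA : yA = 0 := by omega
      have hzB : yB = 0 := hzi.1 hzA
      refine ⟨LA, LB, hIA, hIB, hsp, ?_, ?_⟩
      · rw [pvFA]
        simp only [hAfold]
        rw [if_neg (by rw [hzA]; simp)]
      · rw [pvFB]
        simp only [hBfold]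
        rw [if_neg (by rw [hzB]; simp)]
  · refine ⟨LA, LB, hIA, hIB, hsp, ?_, ?_⟩
    · rw [pvFA]
      have := pvFoldA_le (LA.map (fun b : Nat => (b : Int))) x
      rw [if_neg (by omega)]
    · rw [pvFB]
      have := pvFoldBred_neg LB x (by omega)
      rw [if_neg (by omega)]

theorem pvState (nums : List Int) (hD : ∀ x ∈ nums, x ≤ 2^31) :
    ∀ LA LB : List Nat, pvInv LA → pvInvB LB → (∀ z, pvSpan LA z ↔ pvSpan LB z) →
    ∃ LA' LB', pvInv LA' ∧ pvInvB LB' ∧ (∀ z, pvSpan LA' z ↔ pvSpan LB' z) ∧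
      nums.foldl pvFA (LA.map (fun b : Nat => (b : Int))) = LA'.map (fun b : Nat => (b : Int)) ∧
      nums.foldl pvFB (LB.map (fun b : Nat => (b : Int))) = LB'.map (fun b : Nat => (b : Int)) := by
  induction nums with
  | nil => intro LA LB hIA hIB hsp; exact ⟨LA, LB, hIA, hIB, hsp, rfl, rfl⟩
  | cons x nums ih =>
    intro LA LB hIA hIB hsp
    rcases pvStep_state hIA hIB hsp x (hD x List.mem_cons_self) with ⟨LA1, LB1, hIA1, hIB1, hsp1, hA1, hB1⟩
    rcases ih (fun z hz => hD z (List.mem_cons_of_mem _ hz)) LA1 LB1 hIA1 hIB1 hsp1 with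
      ⟨LA', LB', hIA', hIB', hsp', hA', hB'⟩
    exact ⟨LA', LB', hIA', hIB', hsp', by rw [List.foldl_cons, hA1, hA'], by rw [List.foldl_cons, hB1, hB']⟩

-- ===== the sorted basis =====
theorem pvSorted_basis {LA : List Nat} (hIA : pvInv LA) :
    ∃ Ls : List Nat, Ls.Perm LA ∧ (∀ b ∈ Ls, 0 < b) ∧
      Ls.Pairwise (fun a b => b.log2 < a.log2) ∧
      PySem.List.sorted (LA.map (fun b : Nat => (b : Int))) (fun b => b) true =
        Ls.map (fun b : Nat => (b : Int)) := by
  have hposA : ∀ b ∈ LA, 0 < b := fun b hb => (hIA.1 b hb).1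
  have hndA : LA.Pairwise (fun a b => a ≠ b) := by
    refine hIA.2.imp_of_mem ?_
    intro a b ha hb hab heq
    rw [heq, pvTestBit_log2_self (hposA b hb)] at hab
    simp at hab
  have hldA : LA.Pairwise (fun a b => a.log2 ≠ b.log2) := by
    refine hIA.2.imp_of_mem ?_
    intro a b ha hb hab heq
    rw [heq, pvTestBit_log2_self (hposA b hb)] at hab
    simp at hab
  set Ls := PySem.List.sorted LA (fun b => b) true with hLsdef
  have hperm : Ls.Perm LA := PySem.List.sorted_perm LA (fun b => b) true
  have hposLs : ∀ b ∈ Ls, 0 < b := fun b hb => hposA b (hperm.mem_iff.mp hb)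
  have hge : Ls.Pairwise (fun a b => b ≤ a) := PySem.List.sorted_pairwise_rev LA (fun b => b)
  have hndLs : Ls.Pairwise (fun a b => a ≠ b) := hperm.nodup_iff.mpr hndA
  have hgt : Ls.Pairwise (fun a b => b < a) :=
    (hge.and hndLs).imp (fun h => lt_of_le_of_ne h.1 (Ne.symm h.2))
  have hldLs : Ls.Pairwise (fun a b => a.log2 ≠ b.log2) :=
    (hperm.pairwise_iff (fun {_ _} (h : _ ≠ _) => h.symm)).mpr hldA
  have hdesc : Ls.Pairwise (fun a b => b.log2 < a.log2) := by
    refine (hgt.and hldLs).imp_of_mem ?_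
    intro a b ha hb h
    rcases h with ⟨hba, hlne⟩
    by_contra hcn
    have h1 : a.log2 < b.log2 := by omega
    have h2 : a < 2^(a.log2 + 1) := Nat.lt_log2_self
    have h3 : (2:Nat)^(a.log2 + 1) ≤ 2^b.log2 := Nat.pow_le_pow_right (by norm_num) (by omega)
    have h4 : 2^b.log2 ≤ b := Nat.log2_self_le (by have := hposLs b hb; omega)
    omega
  refine ⟨Ls, hperm, hposLs, hdesc, ?_⟩
  refine PySem.List.sorted_rev_eq_of_perm_of_pairwise_gt (LA.map (fun b : Nat => (b : Int))) _
    (fun b => b) (hperm.map _) ?_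
  rw [List.pairwise_map]
  refine hgt.imp ?_
  intro a b h
  show ((b : Nat) : Int) < ((a : Nat) : Int)
  exact_mod_cast h

-- ===== VERDICT (by name: the statement is the Claim_ definition above) =====
theorem find_max_xor_spec : Claim_equal_find_max_xor := by
  intro nums hD
  show find_max_xor nums = find_max_xor_alt nums
  have hb : ∀ x ∈ nums, x ≤ 2^31 := by
    intro x hx
    have h := List.all_eq_true.1 hD x hx
    have h2 : (-2147483648 ≤ x ∧ x ≤ 2147483648) := by simpa [pvDomInt] using h
    omega
  rcases pvState nums hb [] [] ⟨by simp, List.Pairwise.nil⟩ ⟨by simp, List.Pairwise.nil⟩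
      (fun z => Iff.rfl) with ⟨LA, LB, hIA, hIB, hsp, hA, hB⟩
  simp only [List.map_nil] at hA hB
  rcases pvSorted_basis hIA with ⟨Ls, hperm, hpos, hdesc, hsorted⟩
  have hspLs : ∀ z, pvSpan Ls z ↔ pvSpan LB z := by
    intro z
    rw [← hsp z]
    exact ⟨pvSpan_of_perm hperm, pvSpan_of_perm hperm.symm⟩
  -- the two Nat-level results
  have hMA : pvSpan LB (pvGreedy Ls 0) := by
    have := pvGreedy_span Ls 0
    rw [Nat.xor_zero] at this
    exact (hspLs _).1 this
  have hMB : pvSpan Ls (pvXorAll LB) := (hspLs _).2 (pvXorAll_span LB)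
  have hle1 : pvGreedy Ls 0 ≤ pvXorAll LB := pvXorAll_max hIB hMA
  have hle2 : pvXorAll LB ≤ pvGreedy Ls 0 := by
    have := pvGreedy_ge hpos hdesc 0 _ hMB
    simpa using this
  have heq : pvGreedy Ls 0 = pvXorAll LB := le_antisymm hle1 hle2
  calc find_max_xor nums
      = (PySem.List.sorted (nums.foldl pvFA []) (fun b => b) true).foldl
          (fun res b => max res (PySem.Int.bxor res b)) 0 := rfl
    _ = ((pvGreedy Ls 0 : Nat) : Int) := by
          rw [hA, hsorted, show ((0:Int)) = ((0:Nat):Int) from rfl, pvFoldQA_natCast]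
    _ = ((pvXorAll LB : Nat) : Int) := by rw [heq]
    _ = find_max_xor_alt nums := by
          have hBdef : find_max_xor_alt nums = (nums.foldl pvFB []).foldl
              (fun res r => PySem.Int.bxor res r) 0 := rfl
          rw [hBdef, hB, pvFoldQB_natCast]
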